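-- pv_equiv track=rewrite | github.com/howellzach/aoc | 2021/day1/day1.py | make_groups
-- ===== SOURCE A (Python) =====
-- def make_groups(input):
--     c = 0
--     groups = []
--     try:
--         for i in range(len(input)):
--             group = input[c] + input[c+1] + input[c+2]
--             c += 1
--             groups.append(group)
--     except IndexError:
--         return groups
--
--     return groups
-- ===== SOURCE B (Python) =====
-- def make_groups(input):
--     groups = []
--     window = []
--     for x in input:
--         window.append(x)
--         if len(window) == 3:
--             groups.append(window[0] + window[1] + window[2])
--             window.pop(0)
--     return groups
-- ===== Notes on version B (the rewrite author's own statement) =====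
-- stated objective: alternative
-- what changed: Replaced the indexed lookahead loop terminated by a caught IndexError with a single streaming pass over the elements that maintains a 3-element sliding window buffer and emits its sum whenever the buffer fills.
import Mathlib
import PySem

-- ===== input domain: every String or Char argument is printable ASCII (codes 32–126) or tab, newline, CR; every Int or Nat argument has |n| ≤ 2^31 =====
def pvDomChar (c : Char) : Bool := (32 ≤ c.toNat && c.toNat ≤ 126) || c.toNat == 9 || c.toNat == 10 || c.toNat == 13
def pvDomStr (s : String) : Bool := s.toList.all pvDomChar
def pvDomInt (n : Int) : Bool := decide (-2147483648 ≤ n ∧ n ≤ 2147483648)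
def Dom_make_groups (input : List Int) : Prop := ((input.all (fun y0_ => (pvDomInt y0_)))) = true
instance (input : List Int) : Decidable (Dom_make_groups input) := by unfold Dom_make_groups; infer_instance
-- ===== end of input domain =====

-- B replaces A's indexed lookahead loop (exited by a caught IndexError) with a streaming pass over the elements that maintains a 3-element sliding window buffer (alternative decomposition; same cost).


-- ===== PORT A =====
-- the 'for i in range(len(input))' loop with the try/except IndexError exit:
-- fuel = remaining iterations of range; an out-of-range index returns the groups built so far
def pvLoopA (input : List Int) : Nat → Nat → List Int → List Int
  | 0, _, groups => groups
  | n + 1, c, groups =>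
    match PySem.List.pyGet? input (c : Int), PySem.List.pyGet? input ((c : Int) + 1),
          PySem.List.pyGet? input ((c : Int) + 2) with
    | some x, some y, some z => pvLoopA input n (c + 1) (groups ++ [x + y + z])
    | _, _, _ => groups

def make_groups (input : List Int) : List Int :=
  pvLoopA input input.length 0 []

-- ===== PORT B =====
-- one step of Source B's loop body: state = (window, groups)
def pvStepB (s : List Int × List Int) (x : Int) : List Int × List Int :=
  let w := s.1 ++ [x]
  if w.length == 3 then (w.drop 1, s.2 ++ [w[0]! + w[1]! + w[2]!])
  else (w, s.2)

def make_groups_alt (input : List Int) : List Int :=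
  (input.foldl pvStepB ([], [])).2

-- ===== PRECONDITION & SPEC =====
def Spec_make_groups (input : List Int) (out : List Int) : Prop := out = make_groups_alt input
instance (input : List Int) (out : List Int) : Decidable (Spec_make_groups input out) := by unfold Spec_make_groups; infer_instance

-- ===== CLAIM (what is proved, stated in full; the proofs are below) =====
def Claim_equal_make_groups : Prop := ∀ (input : List Int), Dom_make_groups input → Spec_make_groups input (make_groups input)

-- ===== LEMMAS AND PROOFS =====

-- sums of all windows of three consecutive elements
def pvTriples : List Int → List Int
  | a :: b :: c :: rest => (a + b + c) :: pvTriples (b :: c :: rest)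
  | _ => []

lemma pvTriples_short (l : List Int) (h : l.length ≤ 2) : pvTriples l = [] := by
  match l, h with
  | [], _ => rfl
  | [_], _ => rfl
  | [_, _], _ => rfl

-- windows of the suffix starting at offset c, in zip form
def pvWin (input : List Int) (c : Nat) : List Int :=
  ((input.drop c).zip ((input.drop (c + 1)).zip (input.drop (c + 2)))).map
    (fun p => p.1 + p.2.1 + p.2.2)

lemma pvLoopA_eq (input : List Int) :
    ∀ (n c : Nat) (acc : List Int), input.length ≤ n + c + 1 →
      pvLoopA input n c acc = acc ++ pvWin input c := by
  intro n
  induction n with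
  | zero =>
    intro c acc h
    have h2 : input.drop (c + 2) = [] := List.drop_eq_nil_of_le (by omega)
    simp [pvLoopA, pvWin, h2]
  | succ n ih =>
    intro c acc h
    by_cases hc : c + 2 < input.length
    · have hx : PySem.List.pyGet? input (c : Int) = some input[c] := by
        rw [PySem.List.pyGet?_natCast]; exact List.getElem?_eq_getElem (by omega)
      have hy : PySem.List.pyGet? input ((c : Int) + 1) = some input[c + 1] := by
        have : ((c : Int) + 1) = ((c + 1 : Nat) : Int) := by push_cast; ring
        rw [this, PySem.List.pyGet?_natCast]; exact List.getElem?_eq_getElem (by omega)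
      have hz : PySem.List.pyGet? input ((c : Int) + 2) = some input[c + 2] := by
        have : ((c : Int) + 2) = ((c + 2 : Nat) : Int) := by push_cast; ring
        rw [this, PySem.List.pyGet?_natCast]; exact List.getElem?_eq_getElem hc
      have hwin : pvWin input c = (input[c] + input[c + 1] + input[c + 2]) :: pvWin input (c + 1) := by
        unfold pvWin
        rw [List.drop_eq_getElem_cons (by omega : c < input.length),
            List.drop_eq_getElem_cons (by omega : c + 1 < input.length),
            List.drop_eq_getElem_cons hc]
        simp only [List.zip_cons_cons, List.map_cons]
      rw [pvLoopA, hx, hy, hz]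
      show pvLoopA input n (c + 1) (acc ++ [input[c] + input[c + 1] + input[c + 2]]) =
        acc ++ pvWin input c
      rw [ih (c + 1) (acc ++ [input[c] + input[c + 1] + input[c + 2]]) (by omega), hwin]
      simp
    · have hz : PySem.List.pyGet? input ((c : Int) + 2) = none := by
        have : ((c : Int) + 2) = ((c + 2 : Nat) : Int) := by push_cast; ring
        rw [this, PySem.List.pyGet?_natCast]
        exact List.getElem?_eq_none (by omega)
      have hwin : pvWin input c = [] := by
        unfold pvWin
        rw [List.drop_eq_nil_of_le (show input.length ≤ c + 2 by omega)]
        simp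
      rw [pvLoopA, hz, hwin]
      cases PySem.List.pyGet? input (c : Int) <;>
        cases PySem.List.pyGet? input ((c : Int) + 1) <;> simp

-- the zip form at offset 0 coincides with the structural-recursion form
lemma pvTriples_eq_win : ∀ (l : List Int), pvTriples l = pvWin l 0 := by
  intro l
  induction l with
  | nil => rfl
  | cons a l ih =>
    match l, ih with
    | [], _ => rfl
    | [b], _ => rfl
    | b :: c :: r, ih =>
      show (a + b + c) :: pvTriples (b :: c :: r) = pvWin (a :: b :: c :: r) 0
      rw [ih]
      simp [pvWin]

-- B's streaming fold emits exactly the triple sums of window ++ rest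
lemma pvFoldB_eq (xs : List Int) :
    ∀ (w out : List Int), w.length ≤ 2 →
      (xs.foldl pvStepB (w, out)).2 = out ++ pvTriples (w ++ xs) := by
  induction xs with
  | nil =>
    intro w out hw
    simp [pvTriples_short w hw]
  | cons x xs ih =>
    intro w out hw
    by_cases h2 : w.length = 2
    · obtain ⟨a, b, rfl⟩ := List.length_eq_two.mp h2
      have hstep : pvStepB ([a, b], out) x = ([b, x], out ++ [a + b + x]) := by
        simp [pvStepB]
      rw [List.foldl_cons, hstep, ih [b, x] (out ++ [a + b + x]) (by simp)]
      show (out ++ [a + b + x]) ++ pvTriples (b :: x :: xs) =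
        out ++ pvTriples (a :: b :: x :: xs)
      rw [show pvTriples (a :: b :: x :: xs) = (a + b + x) :: pvTriples (b :: x :: xs) from rfl]
      simp
    · have hstep : pvStepB (w, out) x = (w ++ [x], out) := by
        simp [pvStepB]
        intro habs
        exact absurd (by simpa using habs) h2
      rw [List.foldl_cons, hstep, ih (w ++ [x]) out (by simp; omega)]
      simp

-- ===== VERDICT (by name: the statement is the Claim_ definition above) =====
theorem make_groups_spec : Claim_equal_make_groups := by
  intro input _
  show make_groups input = make_groups_alt input
  rw [make_groups, pvLoopA_eq input input.length 0 [] (by omega),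
      make_groups_alt, pvFoldB_eq input [] [] (by simp)]
  simp [pvTriples_eq_win]
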